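-- pv_equiv track=rewrite | github.com/ROSPI03/csp_ai | unruly.py | encode_solution
-- ===== SOURCE A (Python) =====
-- def encode_solution(board):
--
--     n, m = len(board), len(board[0])
--     encoded = []
--     steps = 0
--
--     for i in range(n):
--         for j in range(m):
--             if board[i][j]:
--                 letter = chr(ord('a') + steps)
--                 if board[i][j] == 'B':
--                     encoded.append(letter.upper())
--                 else:
--                     encoded.append(letter)
--                 steps = 0
--             else:
--                 steps += 1
--
--     encoded.append('a')
--
--     return f"{n}x{m}:{''.join(encoded)}"
-- ===== SOURCE B (Python) =====
-- def encode_solution(board):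
--     n, m = len(board), len(board[0])
--     flat = [board[i][j] for i in range(n) for j in range(m)]
--     segs = []
--     while True:
--         k = next((k for k, c in enumerate(flat) if c), None)
--         if k is None:
--             break
--         segs.append((k, flat[k]))
--         flat = flat[k + 1:]
--     body = ''.join(chr(ord('a') + k).upper() if c == 'B' else chr(ord('a') + k)
--                    for k, c in segs)
--     return f"{n}x{m}:{body}a"
-- ===== Notes on version B (the rewrite author's own statement) =====
-- stated objective: alternative
-- what changed: A makes one stateful pass with a running empty-cell counter reset at each truthy cell; B flattens the board, then repeatedly searches for the next truthy cell and cuts the list past it, collecting (gap, cell) segments, and finally maps the segments to letters in a separate join pass.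
-- outside the precondition, e.g. on encode_solution([]): A raises IndexError, B raises IndexError; on encode_solution([['B', 'W'], ['W']]): A raises IndexError, B raises IndexError
import Mathlib
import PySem

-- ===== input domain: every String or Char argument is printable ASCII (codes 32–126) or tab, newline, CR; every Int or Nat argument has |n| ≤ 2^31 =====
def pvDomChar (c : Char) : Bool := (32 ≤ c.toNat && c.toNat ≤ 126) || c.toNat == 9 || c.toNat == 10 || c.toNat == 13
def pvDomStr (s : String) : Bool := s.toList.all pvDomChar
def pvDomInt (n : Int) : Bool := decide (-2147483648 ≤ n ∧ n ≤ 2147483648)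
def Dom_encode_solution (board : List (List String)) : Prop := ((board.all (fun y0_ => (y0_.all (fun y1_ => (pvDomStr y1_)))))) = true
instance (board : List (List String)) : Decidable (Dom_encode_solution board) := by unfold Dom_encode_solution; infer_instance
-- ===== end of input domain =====

-- B replaces A's single stateful scan (a running empty-cell counter reset at each truthy
-- cell) by flatten-then-repeated-search: find the next truthy cell, record (index-in-slice,
-- cell) as a segment, cut the slice there, repeat; the letters are produced from the
-- segments in a separate pass (objective: alternative; return value only, no mutation).

-- shared primitives of both ports (both Pythons compute chr(ord('a')+gap) and
-- 'letter.upper() if cell == 'B' else letter'):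

-- Python's str.upper() of the single character chr(k), as code points
-- (exact for k ≤ 383, i.e. runs of up to 286 empty cells; verified against CPython).
def pvUpperCode (k : Nat) : List Nat :=
  if 97 ≤ k ∧ k ≤ 122 then [k - 32]
  else if k = 181 then [924]
  else if k = 223 then [83, 83]
  else if (224 ≤ k ∧ k ≤ 246) ∨ (248 ≤ k ∧ k ≤ 254) then [k - 32]
  else if k = 255 then [376]
  else if k = 305 then [73]
  else if 256 ≤ k ∧ k ≤ 311 then (if k % 2 = 1 then [k - 1] else [k])
  else if 313 ≤ k ∧ k ≤ 328 then (if k % 2 = 0 then [k - 1] else [k])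
  else if k = 329 then [700, 78]
  else if 330 ≤ k ∧ k ≤ 375 then (if k % 2 = 1 then [k - 1] else [k])
  else if 377 ≤ k ∧ k ≤ 382 then (if k % 2 = 0 then [k - 1] else [k])
  else if k = 383 then [83]
  else [k]

def pvUpperChars (k : Nat) : List Char := (pvUpperCode k).map Char.ofNat

-- letter.upper() if cell == 'B' else letter, where letter = chr(ord('a') + k)
def pvLetter (k : Nat) (cell : String) : List Char :=
  if cell = "B" then pvUpperChars (97 + k) else [Char.ofNat (97 + k)]

-- ===== PORT A =====
def encode_solution (board : List (List String)) : String :=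
  let n : Int := board.length
  let m : Int := (PySem.List.pyGetD board 0 []).length
  let r := (PySem.List.pyRange 0 n).foldl (fun (st : List Char × Nat) i =>
      (PySem.List.pyRange 0 m).foldl (fun (st : List Char × Nat) j =>
        let cell := PySem.List.pyGetD (PySem.List.pyGetD board i []) j ""
        if cell ≠ "" then (st.1 ++ pvLetter st.2 cell, 0)
        else (st.1, st.2 + 1)) st) (([] : List Char), 0)
  let encoded := r.1 ++ ['a']
  String.ofList (PySem.Int.toChars n ++ ['x'] ++ PySem.Int.toChars m ++ [':'] ++ encoded)

-- ===== PORT B =====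

-- next((k for k, c in enumerate(flat) if c), None), together with the cell found there
def pvFindTruthy : List String → Option (Nat × String)
  | [] => none
  | c :: rest => if c ≠ "" then some (0, c)
                 else (pvFindTruthy rest).map (fun p => (p.1 + 1, p.2))

-- the while loop: collect the (index, cell) of each found truthy cell and cut the
-- slice past it; flat[k+1:] with 0 ≤ k+1 ≤ len is exactly List.drop (k+1)
def pvSegs (cells : List String) : List (Nat × String) :=
  match h : pvFindTruthy cells with
  | none => []
  | some (k, c) => (k, c) :: pvSegs (cells.drop (k + 1))
termination_by cells.length
decreasing_by
  cases cells with
  | nil => simp [pvFindTruthy] at h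
  | cons a r => simp [List.length_drop]

def encode_solution_alt (board : List (List String)) : String :=
  let n : Int := board.length
  let m : Int := (PySem.List.pyGetD board 0 []).length
  let flat := (PySem.List.pyRange 0 n).foldl (fun (acc : List String) i =>
      (PySem.List.pyRange 0 m).foldl (fun (acc : List String) j =>
        acc ++ [PySem.List.pyGetD (PySem.List.pyGetD board i []) j ""]) acc) []
  let body := ((pvSegs flat).map (fun p => pvLetter p.1 p.2)).flatten
  String.ofList (PySem.Int.toChars n ++ ['x'] ++ PySem.Int.toChars m ++ [':'] ++ body ++ ['a'])

-- ===== PRECONDITION & SPEC =====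
-- Pre_ excludes exactly the inputs where Python A raises IndexError: the empty board
-- (board[0]) and boards whose later rows are shorter than row 0 (board[i][j], j < m).
def Pre_encode_solution (board : List (List String)) : Prop :=
  board ≠ [] ∧ ∀ row ∈ board, (board.headD []).length ≤ row.length
instance (board : List (List String)) : Decidable (Pre_encode_solution board) := by
  unfold Pre_encode_solution; infer_instance
def pvWitness_encode_solution : List (List String) := [["B", "W"], ["W", ""]]

def Spec_encode_solution (board : List (List String)) (out : String) : Prop := out = encode_solution_alt board
instance (board : List (List String)) (out : String) : Decidable (Spec_encode_solution board out) := by unfold Spec_encode_solution; infer_instance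

-- ===== CLAIM (what is proved, stated in full; the proofs are below) =====
def Claim_equal_encode_solution : Prop := ∀ (board : List (List String)), Dom_encode_solution board → Pre_encode_solution board → Spec_encode_solution board (encode_solution board)

-- ===== LEMMAS AND PROOFS =====

-- A's per-cell step: emit a letter for a truthy cell (uppercased for 'B'), else count.
def stepA (st : List Char × Nat) (cell : String) : List Char × Nat :=
  if cell ≠ "" then (st.1 ++ pvLetter st.2 cell, 0)
  else (st.1, st.2 + 1)

-- the letters emitted by A's counter scan, functional form, with the running counter s
def encP : Nat → List String → List Char
  | _, [] => ['a']
  | s, c :: rest =>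
      if c ≠ "" then pvLetter s c ++ encP 0 rest
      else encP (s + 1) rest

-- the ports with their lets unfolded (definitional)
lemma encode_solution_def (board : List (List String)) :
    encode_solution board =
    String.ofList (PySem.Int.toChars (board.length : Int) ++ ['x'] ++
      PySem.Int.toChars ((PySem.List.pyGetD board 0 []).length : Int) ++ [':'] ++
      (((PySem.List.pyRange 0 (board.length : Int)).foldl (fun st i =>
          (PySem.List.pyRange 0 ((PySem.List.pyGetD board 0 []).length : Int)).foldl (fun st j =>
            stepA st (PySem.List.pyGetD (PySem.List.pyGetD board i []) j "")) st)
        (([] : List Char), 0)).1 ++ ['a'])) := rfl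

lemma encode_solution_alt_def (board : List (List String)) :
    encode_solution_alt board =
    String.ofList (PySem.Int.toChars (board.length : Int) ++ ['x'] ++
      PySem.Int.toChars ((PySem.List.pyGetD board 0 []).length : Int) ++ [':'] ++
      ((pvSegs ((PySem.List.pyRange 0 (board.length : Int)).foldl (fun acc i =>
          (PySem.List.pyRange 0 ((PySem.List.pyGetD board 0 []).length : Int)).foldl (fun acc j =>
            acc ++ [PySem.List.pyGetD (PySem.List.pyGetD board i []) j ""]) acc) [])).map
        (fun p => pvLetter p.1 p.2)).flatten ++ ['a']) := rfl

-- generic inner loop: a range(m) fold reading row[j] is a structural fold over row.take m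
lemma pv_inner {β : Type} (g : β → String → β) (m0 : Nat) (row : List String)
    (hm : m0 ≤ row.length) (st : β) :
    (PySem.List.pyRange 0 (m0 : Int)).foldl (fun st j =>
        g st (PySem.List.pyGetD row j "")) st
    = (row.take m0).foldl g st := by
  have hlen : (row.take m0).length = m0 := by simp [hm]
  rw [PySem.List.foldl_congr_mem _ _ (fun st j => g st (PySem.List.pyGetD (row.take m0) j "")) _ ?_]
  · rw [show ((m0 : Nat) : Int) = ((row.take m0).length : Int) by rw [hlen]]
    exact PySem.List.foldl_pyRange_zero_pyGetD' (row.take m0) "" g st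
  · intro acc j hj
    rw [PySem.List.mem_pyRange_one] at hj
    show g acc (PySem.List.pyGetD row j "") = g acc (PySem.List.pyGetD (row.take m0) j "")
    have h1 : (0:Int) ≤ j := hj.1
    have h2 : j < ((row.take m0).length : Int) := by rw [hlen]; exact hj.2
    have h2' : j < (row.length : Int) := by rw [hlen] at h2; omega
    rw [PySem.List.pyGetD_eq_getElem _ _ h1 h2', PySem.List.pyGetD_eq_getElem _ _ h1 h2]
    congr 1
    rw [List.getElem_take]

-- generic whole board: the nested range folds are a fold over the width-m0 truncated rows, flattened
lemma pv_outer {β : Type} (g : β → String → β) (m0 : Nat) (board : List (List String))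
    (hr : ∀ r ∈ board, m0 ≤ r.length) (st : β) :
    (PySem.List.pyRange 0 (board.length : Int)).foldl (fun st i =>
        (PySem.List.pyRange 0 (m0 : Int)).foldl (fun st j =>
          g st (PySem.List.pyGetD (PySem.List.pyGetD board i []) j "")) st) st
    = ((board.map (fun r => r.take m0)).flatten).foldl g st := by
  rw [PySem.List.foldl_pyRange_zero_pyGetD' board ([] : List String)
      (fun st row => (PySem.List.pyRange 0 (m0 : Int)).foldl
        (fun st j => g st (PySem.List.pyGetD row j "")) st) st]
  rw [PySem.List.foldl_congr_mem _ _ (fun st row => (row.take m0).foldl g st) _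
      (fun st r hrm => pv_inner g m0 r (hr r hrm) st)]
  rw [List.foldl_flatten, List.foldl_map]

-- collecting by appending singletons is the identity
lemma pv_foldl_snoc : ∀ (xs : List String) (acc : List String),
    xs.foldl (fun a c => a ++ [c]) acc = acc ++ xs := by
  intro xs
  induction xs with
  | nil => simp
  | cons x r ih => intro acc; simp [List.foldl_cons, ih, List.append_assoc]

-- A's counter fold, followed by the trailing 'a', computes encP
lemma pv_foldA : ∀ (cells : List String) (acc : List Char) (s : Nat),
    (cells.foldl stepA (acc, s)).1 ++ ['a'] = acc ++ encP s cells := by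
  intro cells
  induction cells with
  | nil => intro acc s; simp [encP]
  | cons c rest ih =>
    intro acc s
    by_cases hc : c = "" <;> simp [stepA, encP, hc, ih, List.append_assoc]

-- encP satisfies B's find-and-slice recurrence
lemma pv_encP_char : ∀ (cells : List String) (s : Nat),
    encP s cells =
      match pvFindTruthy cells with
      | none => ['a']
      | some (k, c) => pvLetter (s + k) c ++ encP 0 (cells.drop (k + 1)) := by
  intro cells
  induction cells with
  | nil => intro s; simp [pvFindTruthy, encP]
  | cons c rest ih =>
    intro s
    by_cases hc : c = ""
    · simp only [pvFindTruthy, hc, ne_eq, not_true_eq_false, if_false, encP, ih (s + 1)]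
      cases hfr : pvFindTruthy rest with
      | none => simp
      | some p =>
        simp only [Option.map_some]
        have : s + 1 + p.1 = s + (p.1 + 1) := by omega
        simp [this]
    · simp [pvFindTruthy, hc, encP]
-- the letters of B's segments, plus the trailing 'a', equal encP 0
lemma pv_segs_encP : ∀ (cells : List String),
    ((pvSegs cells).map (fun p => pvLetter p.1 p.2)).flatten ++ ['a'] = encP 0 cells := by
  intro cells
  induction cells using pvSegs.induct with
  | case1 cells h =>
    rw [pvSegs, h, pv_encP_char cells 0, h]
    simp
  | case2 cells k c h ih =>
    rw [pvSegs, h, pv_encP_char cells 0, h]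
    simp only [Nat.zero_add, List.map_cons, List.flatten_cons]
    rw [← ih]
    simp [List.append_assoc]

-- ===== VERDICT (by name: the statement is the Claim_ definition above) =====
theorem encode_solution_spec : Claim_equal_encode_solution := by
  intro board hdom hpre
  obtain ⟨hne, hrows⟩ := hpre
  obtain ⟨r0, rs, rfl⟩ := List.exists_cons_of_ne_nil hne
  unfold Spec_encode_solution
  rw [encode_solution_def, encode_solution_alt_def]
  have hm0 : PySem.List.pyGetD (r0 :: rs) 0 ([] : List String) = r0 :=
    PySem.List.pyGetD_zero_cons r0 rs []
  rw [hm0]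
  have hr : ∀ r ∈ (r0 :: rs), r0.length ≤ r.length := by
    intro r hrm
    have := hrows r hrm
    simpa using this
  rw [pv_outer stepA r0.length (r0 :: rs) hr (([] : List Char), 0)]
  rw [pv_outer (fun (a : List String) c => a ++ [c]) r0.length (r0 :: rs) hr []]
  rw [pv_foldl_snoc, List.nil_append, pv_foldA, List.nil_append, ← pv_segs_encP]
  simp [List.append_assoc]
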